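-- pv_equiv track=rewrite | github.com/arnabs542/oj | leetcode/increasingSubsequences.py | _findSubsequencesDfs
-- ===== SOURCE A (Python) =====
-- def _findSubsequencesDfs(nums):
--     def dfs(seq, i):
--         if len(seq) >= 2: result.append(seq)
--         for j in range(i, len(nums)):
--             if nums[j] in nums[i:j]: continue # duplicate: value already used
--             if seq and nums[j] < seq[-1]: continue
--             dfs(seq + [nums[j]], j + 1)
--     result = []
--     dfs([], 0)
--     return result
-- ===== SOURCE B (Python) =====
-- def _findSubsequencesDfs(nums):
--     # Iterative DFS: explicit LIFO stack of (seq, start) states replaces recursion.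
--     result = []
--     stack = [([], 0)]
--     while stack:
--         seq, start = stack.pop()
--         if len(seq) >= 2:
--             result.append(seq)
--         children = []
--         for j in range(start, len(nums)):
--             if nums[j] in nums[start:j]:
--                 continue
--             if seq and nums[j] < seq[-1]:
--                 continue
--             children.append((seq + [nums[j]], j + 1))
--         stack.extend(reversed(children))  # so children are popped in increasing j order
--     return result
-- ===== Notes on version B (the rewrite author's own statement) =====
-- stated objective: alternative
-- what changed: Replaced the recursive nested dfs with an iterative explicit-stack DFS: states (seq, start) are popped from a LIFO stack, with guarded children pushed in reverse j order so A's exact preorder output is reproduced.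
import Mathlib
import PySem

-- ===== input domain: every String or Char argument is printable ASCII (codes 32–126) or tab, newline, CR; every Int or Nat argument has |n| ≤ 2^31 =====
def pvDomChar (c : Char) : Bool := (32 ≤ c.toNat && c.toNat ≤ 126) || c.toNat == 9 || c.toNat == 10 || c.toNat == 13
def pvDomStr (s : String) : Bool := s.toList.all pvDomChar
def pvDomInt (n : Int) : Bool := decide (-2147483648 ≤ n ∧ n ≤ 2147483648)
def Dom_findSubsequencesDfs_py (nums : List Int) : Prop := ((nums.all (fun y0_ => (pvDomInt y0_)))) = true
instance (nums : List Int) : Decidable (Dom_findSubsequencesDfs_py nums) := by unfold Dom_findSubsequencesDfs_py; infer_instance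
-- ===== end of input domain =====

-- B replaces A's recursive dfs by an iterative explicit-stack DFS (children pushed in reverse),
-- producing the identical preorder output; objective: alternative decomposition, same cost.

-- ===== PORT A =====
-- dfsA/dfsLoopA transliterate A's inner `dfs`: the result list becomes the returned list
-- (append to a shared `result` in preorder = head ++ recursive results in loop order).
-- Indices i, j are always 0 ≤ i ≤ j < len(nums) here, so nums[j] is `nums[j]` with proof,
-- and the slice nums[i:j] is `(nums.drop i).take (j - i)` — exact on this index range.
-- `seq and nums[j] < seq[-1]` is `seq.getLast?.elim false (nums[j] < ·)` — exact.
mutual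
def dfsA (nums : List Int) (seq : List Int) (i : Nat) : List (List Int) :=
  (if 2 ≤ seq.length then [seq] else []) ++ dfsLoopA nums seq i i
termination_by 2 * (nums.length - i) + 1
decreasing_by omega

def dfsLoopA (nums : List Int) (seq : List Int) (i j : Nat) : List (List Int) :=
  if h : j < nums.length then
    (if nums[j] ∈ (nums.drop i).take (j - i) then []
     else if seq.getLast?.elim false (fun last => nums[j] < last) then []
     else dfsA nums (seq ++ [nums[j]]) (j + 1)) ++ dfsLoopA nums seq i (j + 1)
  else []
termination_by 2 * (nums.length - j)
decreasing_by all_goals omega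
end

def findSubsequencesDfs_py (nums : List Int) : List (List Int) :=
  dfsA nums [] 0

-- ===== PORT B =====
-- childLoopB is Source B's inner `for j in range(start, len(nums))` building `children`.
def childLoopB (nums : List Int) (seq : List Int) (i j : Nat) : List (List Int × Nat) :=
  if h : j < nums.length then
    (if nums[j] ∈ (nums.drop i).take (j - i) then []
     else if seq.getLast?.elim false (fun last => nums[j] < last) then []
     else [(seq ++ [nums[j]], j + 1)]) ++ childLoopB nums seq i (j + 1)
  else []
termination_by nums.length - j

-- The `while stack` loop; stack head = top. `stack.extend(reversed(children))` followed by
-- popping means the new stack is children ++ rest. The fuel argument is only a totality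
-- guard; 2 ^ nums.length is proved sufficient below (never reaches 0 on the real run).
def stackRunB (nums : List Int) : Nat → List (List Int × Nat) → List (List Int) → List (List Int)
  | 0, _, acc => acc
  | _ + 1, [], acc => acc
  | fuel + 1, (seq, start) :: rest, acc =>
      stackRunB nums fuel (childLoopB nums seq start start ++ rest)
        (acc ++ if 2 ≤ seq.length then [seq] else [])

def findSubsequencesDfs_py_alt (nums : List Int) : List (List Int) :=
  stackRunB nums (2 ^ nums.length) [([], 0)] []

-- ===== PRECONDITION & SPEC =====
def Spec_findSubsequencesDfs_py (nums : List Int) (out : List (List Int)) : Prop := out = findSubsequencesDfs_py_alt nums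
instance (nums : List Int) (out : List (List Int)) : Decidable (Spec_findSubsequencesDfs_py nums out) := by unfold Spec_findSubsequencesDfs_py; infer_instance

-- ===== CLAIM (what is proved, stated in full; the proofs are below) =====
def Claim_equal_findSubsequencesDfs_py : Prop := ∀ (nums : List Int), Dom_findSubsequencesDfs_py nums → Spec_findSubsequencesDfs_py nums (findSubsequencesDfs_py nums)

-- ===== LEMMAS AND PROOFS =====

-- Measure of a stack: each state (seq, s) can generate at most 2 ^ (n - s) pops.
def Mstack (n : Nat) (st : List (List Int × Nat)) : Nat :=
  (st.map (fun p => 2 ^ (n - p.2))).sum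

theorem Mstack_append (n : Nat) (a b : List (List Int × Nat)) :
    Mstack n (a ++ b) = Mstack n a + Mstack n b := by
  simp [Mstack]

theorem Mstack_childLoopB (nums seq : List Int) (i j : Nat) :
    Mstack nums.length (childLoopB nums seq i j) ≤ 2 ^ (nums.length - j) - 1 := by
  fun_induction childLoopB nums seq i j with
  | case1 j h ih =>
    rw [Mstack_append]
    have hpow : 2 ^ (nums.length - j) = 2 ^ (nums.length - (j + 1)) * 2 := by
      rw [← pow_succ]; congr 1; omega
    have hpos : 1 ≤ 2 ^ (nums.length - (j + 1)) := Nat.one_le_two_pow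
    split_ifs with h1 h2 <;>
      simp only [Mstack, List.map_cons, List.map_nil, List.sum_cons, List.sum_nil] at ih ⊢ <;>
      omega
  | case2 j h =>
    simp [Mstack]

-- The loop body of A equals flatMap of dfsA over B's children list.
theorem dfsLoopA_eq_flatMap (nums seq : List Int) (i : Nat) :
    ∀ (k j : Nat), nums.length ≤ j + k →
    dfsLoopA nums seq i j = (childLoopB nums seq i j).flatMap (fun p => dfsA nums p.1 p.2) := by
  intro k
  induction k with
  | zero =>
    intro j hk
    have h : ¬ j < nums.length := by omega
    rw [dfsLoopA, childLoopB]
    simp [h]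
  | succ k ih =>
    intro j hk
    rw [dfsLoopA, childLoopB]
    by_cases h : j < nums.length
    · simp only [h, dif_pos]
      split_ifs with h1 h2 <;> simp [ih (j + 1) (by omega)]
    · simp [h]

-- Stack invariant: with enough fuel, the stack loop emits acc then the DFS results of each
-- pending state in order.
theorem stackRunB_eq (nums : List Int) (fuel : Nat) :
    ∀ (st : List (List Int × Nat)) (acc : List (List Int)),
      Mstack nums.length st ≤ fuel →
      stackRunB nums fuel st acc = acc ++ st.flatMap (fun p => dfsA nums p.1 p.2) := by
  induction fuel with
  | zero =>
    intro st acc hM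
    cases st with
    | nil => simp [stackRunB]
    | cons p rest =>
      exfalso
      have : 1 ≤ 2 ^ (nums.length - p.2) := Nat.one_le_two_pow
      simp only [Mstack, List.map_cons, List.sum_cons] at hM
      omega
  | succ fuel ih =>
    intro st acc hM
    cases st with
    | nil => simp [stackRunB]
    | cons p rest =>
      obtain ⟨seq, s⟩ := p
      have hc := Mstack_childLoopB nums seq s s
      have hpos : 1 ≤ 2 ^ (nums.length - s) := Nat.one_le_two_pow
      have hM' : Mstack nums.length (childLoopB nums seq s s ++ rest) ≤ fuel := by
        rw [Mstack_append]
        simp only [Mstack, List.map_cons, List.sum_cons] at hM hc ⊢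
        omega
      rw [stackRunB, ih _ _ hM']
      rw [List.flatMap_cons, dfsA.eq_def,
        dfsLoopA_eq_flatMap nums seq s nums.length s (by omega)]
      simp [List.flatMap_append, List.append_assoc]

-- ===== VERDICT (by name: the statement is the Claim_ definition above) =====
theorem findSubsequencesDfs_py_spec : Claim_equal_findSubsequencesDfs_py := by
  intro nums _
  unfold Spec_findSubsequencesDfs_py findSubsequencesDfs_py findSubsequencesDfs_py_alt
  rw [stackRunB_eq nums (2 ^ nums.length) [([], 0)] []]
  · simp
  · simp [Mstack]
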